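-- pv_equiv track=rewrite | github.com/akhandsingh17/assignments | codingexercise/CommonElementsIndexSum.py | CommonElementsIndexSum
-- ===== SOURCE A (Python) =====
-- def CommonElementsIndexSum(lst1,lst2):
--
--     dict={}
--
--     for l in lst1:
--         if l in lst2:
--             idx1 = lst1.index(l)
--             idx2=lst2.index(l)
--             sum=idx2+idx1
--             if sum in dict.keys():
--                 dict[sum].append(l)
--             else:
--                 tmp=[]
--                 tmp.append(l)
--                 dict[sum]=tmp
--
--     sort=sorted(dict.items(),key=lambda x:x[0])[0]
--
--     return sort[1]
-- ===== SOURCE B (Python) =====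
-- def CommonElementsIndexSum(lst1, lst2):
--     # min-then-filter: no grouping dict, no sort. Two passes: compute the minimal
--     # index-sum over common elements, then collect the elements achieving it.
--     first2 = {}
--     for j, v in enumerate(lst2):
--         first2.setdefault(v, j)
--     first1 = {}
--     for i, v in enumerate(lst1):
--         first1.setdefault(v, i)
--     best = min(first1[v] + first2[v] for v in lst1 if v in first2)
--     return [v for v in lst1 if v in first2 and first1[v] + first2[v] == best]
-- ===== Notes on version B (the rewrite author's own statement) =====
-- stated objective: faster
-- what changed: B never builds A's dict of index-sum groups and never sorts: it precomputes first-occurrence index maps, takes the minimum index-sum in one pass over lst1, and returns the elements achieving it with a second filtering pass.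
import Mathlib
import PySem

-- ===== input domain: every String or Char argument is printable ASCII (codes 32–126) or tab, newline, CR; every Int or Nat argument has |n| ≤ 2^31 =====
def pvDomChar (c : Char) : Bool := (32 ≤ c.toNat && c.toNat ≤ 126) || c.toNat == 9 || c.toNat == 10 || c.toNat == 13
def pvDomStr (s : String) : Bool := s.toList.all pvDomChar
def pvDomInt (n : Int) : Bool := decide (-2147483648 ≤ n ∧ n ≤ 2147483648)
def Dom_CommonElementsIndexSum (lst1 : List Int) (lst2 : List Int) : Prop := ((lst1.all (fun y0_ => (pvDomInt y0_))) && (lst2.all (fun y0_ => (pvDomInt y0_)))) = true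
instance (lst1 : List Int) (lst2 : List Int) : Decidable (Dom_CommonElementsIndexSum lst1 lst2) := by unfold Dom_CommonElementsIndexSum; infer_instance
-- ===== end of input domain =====

-- B drops A's grouping dict and its sort entirely: it computes the minimal index-sum over the
-- common elements of lst1 and filters lst1 for the elements achieving it (objective: faster).

-- ===== PORT A =====
def CommonElementsIndexSum (lst1 : List Int) (lst2 : List Int) : List Int :=
  let d := lst1.foldl (fun (d : PySem.Dict Int (List Int)) l =>
    if lst2.contains l then
      -- l ∈ lst1 and l ∈ lst2 here, so .index never raises: getD 0 is exact
      let idx1 : Int := ((PySem.List.index? lst1 l).getD 0 : Nat)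
      let idx2 : Int := ((PySem.List.index? lst2 l).getD 0 : Nat)
      let sum : Int := idx2 + idx1
      if d.contains sum then d.modify sum [] (· ++ [l]) else d.insert sum [l]
    else d) PySem.Dict.empty
  match (PySem.List.sorted d.items (fun x => x.1) false).head? with
  | some p => p.2
  | none => []   -- sorted(dict.items(),…)[0] raises IndexError: excluded by Pre_

-- ===== PORT B =====
def CommonElementsIndexSum_alt (lst1 : List Int) (lst2 : List Int) : List Int :=
  let first2 := (PySem.List.enumerate lst2).foldl
    (fun (d : PySem.Dict Int Int) p => d.setdefault p.2 p.1) PySem.Dict.empty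
  let first1 := (PySem.List.enumerate lst1).foldl
    (fun (d : PySem.Dict Int Int) p => d.setdefault p.2 p.1) PySem.Dict.empty
  -- v ∈ lst1 so first1[v] never raises, and v ∈ first2 is checked: getD is exact
  match PySem.List.min?
      ((lst1.filter (fun v => first2.contains v)).map (fun v => first1.getD v 0 + first2.getD v 0))
      (fun x => x) with
  | some best =>
      lst1.filter (fun v => first2.contains v && (first1.getD v 0 + first2.getD v 0 == best))
  | none => []   -- min() of an empty generator raises ValueError: excluded by Pre_

-- ===== PRECONDITION & SPEC =====
-- Pre_ excludes exactly the inputs with no common element, on which A raises IndexError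
-- (sorted(dict.items(), …)[0] on an empty dict).
def Pre_CommonElementsIndexSum (lst1 : List Int) (lst2 : List Int) : Prop :=
  lst1.any (fun x => lst2.contains x) = true
instance (lst1 : List Int) (lst2 : List Int) : Decidable (Pre_CommonElementsIndexSum lst1 lst2) := by unfold Pre_CommonElementsIndexSum; infer_instance

def pvWitness_CommonElementsIndexSum : List Int × List Int := ([1, 2, 2], [2, 3])

def Spec_CommonElementsIndexSum (lst1 : List Int) (lst2 : List Int) (out : List Int) : Prop := out = CommonElementsIndexSum_alt lst1 lst2
instance (lst1 : List Int) (lst2 : List Int) (out : List Int) : Decidable (Spec_CommonElementsIndexSum lst1 lst2 out) := by unfold Spec_CommonElementsIndexSum; infer_instance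

-- ===== CLAIM (what is proved, stated in full; the proofs are below) =====
def Claim_equal_CommonElementsIndexSum : Prop := ∀ (lst1 : List Int) (lst2 : List Int), Dom_CommonElementsIndexSum lst1 lst2 → Pre_CommonElementsIndexSum lst1 lst2 → Spec_CommonElementsIndexSum lst1 lst2 (CommonElementsIndexSum lst1 lst2)

-- ===== LEMMAS AND PROOFS =====

-- the setdefault fold of port B computes PySem.List.index?
theorem firstIdx_get? (xs : List Int) (v : Int) : ∀ (s : Int) (d : PySem.Dict Int Int),
    ((PySem.List.enumerate xs s).foldl
      (fun (d : PySem.Dict Int Int) p => d.setdefault p.2 p.1) d).get? v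
    = if d.contains v then d.get? v
      else (PySem.List.index? xs v).map (fun k : Nat => s + (k : Int)) := by
  induction xs with
  | nil =>
    intro s d
    rw [PySem.List.enumerate_nil]
    by_cases hv : d.contains v
    · simp [hv]
    · simp only [List.foldl_nil, hv, Bool.false_eq_true, if_false]
      rw [(PySem.Dict.get?_eq_none_iff_contains d v).mpr (by simpa using hv)]
      rw [(PySem.List.index?_eq_none_iff ([] : List Int) v).mpr (by simp)]
      rfl
  | cons x xs ih =>
    intro s d
    rw [PySem.List.enumerate_cons, List.foldl_cons, ih]
    by_cases hxv : x = v
    · subst hxv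
      rw [PySem.List.index?_cons_self]
      by_cases hc : d.contains x
      · rw [PySem.Dict.setdefault_of_contains d s hc]
        simp [hc]
      · rw [PySem.Dict.setdefault_of_not_contains d s (by simpa using hc)]
        simp only [hc, Bool.false_eq_true, if_false]
        rw [if_pos (by simp [PySem.Dict.contains_insert_self])]
        rw [PySem.Dict.get?_insert_self]
        simp
    · rw [PySem.List.index?_cons_of_ne xs hxv]
      have hm : Option.map (fun k : Nat => s + (k : Int)) ((PySem.List.index? xs v).map (· + 1))
          = Option.map (fun k : Nat => (s + 1) + (k : Int)) (PySem.List.index? xs v) := by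
        cases PySem.List.index? xs v
        · rfl
        · simp only [Option.map_some]
          apply congrArg; push_cast; ring
      rw [hm]
      by_cases hc : d.contains x
      · rw [PySem.Dict.setdefault_of_contains d s hc]
      · rw [PySem.Dict.setdefault_of_not_contains d s (by simpa using hc)]
        have hcv : (d.insert x s).contains v = d.contains v := by
          rw [PySem.Dict.contains_insert]
          have hne : (v == x) = false := by
            simp only [beq_eq_false_iff_ne, ne_eq]
            exact fun h => hxv h.symm
          simp [hne]
        rw [hcv, PySem.Dict.get?_insert_of_ne d s (Ne.symm hxv)]

-- B's first-index dict for a list xs: get? v = index? xs v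
theorem firstIdx_get?_zero (xs : List Int) (v : Int) :
    ((PySem.List.enumerate xs).foldl
      (fun (d : PySem.Dict Int Int) p => d.setdefault p.2 p.1) PySem.Dict.empty).get? v
    = (PySem.List.index? xs v).map (fun k : Nat => (k : Int)) := by
  rw [firstIdx_get? xs v 0 PySem.Dict.empty]
  simp [PySem.Dict.contains_empty]

theorem firstIdx_contains (xs : List Int) (v : Int) :
    ((PySem.List.enumerate xs).foldl
      (fun (d : PySem.Dict Int Int) p => d.setdefault p.2 p.1) PySem.Dict.empty).contains v
    = xs.contains v := by
  rw [PySem.Dict.contains_eq_isSome_get?, firstIdx_get?_zero xs v]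
  by_cases hm : v ∈ xs
  · obtain ⟨k, hk⟩ := Option.isSome_iff_exists.mp ((PySem.List.index?_isSome_iff xs v).mpr hm)
    rw [hk]
    simp [hm]
  · rw [(PySem.List.index?_eq_none_iff xs v).mpr hm]
    simp [hm]

theorem firstIdx_getD_of_mem (xs : List Int) (v : Int) (hm : v ∈ xs) :
    ((PySem.List.enumerate xs).foldl
      (fun (d : PySem.Dict Int Int) p => d.setdefault p.2 p.1) PySem.Dict.empty).getD v 0
    = (((PySem.List.index? xs v).getD 0 : Nat) : Int) := by
  obtain ⟨k, hk⟩ := Option.isSome_iff_exists.mp ((PySem.List.index?_isSome_iff xs v).mpr hm)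
  rw [PySem.Dict.getD_eq_get?_getD, firstIdx_get?_zero, hk]
  rfl

-- A's loop is a 'modify' fold over the common elements of lst1
theorem Afold_eq_filter (lst1 lst2 : List Int) :
    (lst1.foldl (fun (d : PySem.Dict Int (List Int)) l =>
      if lst2.contains l then
        let idx1 : Int := ((PySem.List.index? lst1 l).getD 0 : Nat)
        let idx2 : Int := ((PySem.List.index? lst2 l).getD 0 : Nat)
        let sum : Int := idx2 + idx1
        if d.contains sum then d.modify sum [] (· ++ [l]) else d.insert sum [l]
      else d) PySem.Dict.empty)
    = ((lst1.filter (fun l => lst2.contains l)).foldl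
        (fun (d : PySem.Dict Int (List Int)) l =>
          d.modify ((((PySem.List.index? lst2 l).getD 0 : Nat) : Int)
            + (((PySem.List.index? lst1 l).getD 0 : Nat) : Int)) [] (· ++ [l])) PySem.Dict.empty) := by
  rw [← PySem.List.foldl_if_eq_foldl_filter]
  apply PySem.List.foldl_congr_mem
  intro d l _
  by_cases h2 : lst2.contains l
  · simp only [h2, if_true]
    set k : Int := (((PySem.List.index? lst2 l).getD 0 : Nat) : Int)
      + (((PySem.List.index? lst1 l).getD 0 : Nat) : Int) with hk
    by_cases hc : d.contains k
    · rw [if_pos hc]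
    · rw [if_neg hc]
      simp only [PySem.Dict.modify]
      rw [PySem.Dict.getD_of_not_contains d ([] : List Int) (by simpa using hc)]
      simp only [List.nil_append]
  · simp only [h2, Bool.false_eq_true, if_false]

-- each group of A's dict is the corresponding filter of the common elements
theorem Adict_getD (lst1 lst2 : List Int) (c : Int) :
    ((lst1.filter (fun l => lst2.contains l)).foldl
        (fun (d : PySem.Dict Int (List Int)) l =>
          d.modify ((((PySem.List.index? lst2 l).getD 0 : Nat) : Int)
            + (((PySem.List.index? lst1 l).getD 0 : Nat) : Int)) [] (· ++ [l]))
        PySem.Dict.empty).getD c []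
    = (lst1.filter (fun l => lst2.contains l)).filter
        (fun l => ((((PySem.List.index? lst2 l).getD 0 : Nat) : Int)
            + (((PySem.List.index? lst1 l).getD 0 : Nat) : Int)) == c) := by
  have h := PySem.Dict.getD_foldl_modify_append
    (l := (lst1.filter (fun l => lst2.contains l)).map
      (fun l => (((((PySem.List.index? lst2 l).getD 0 : Nat) : Int)
        + (((PySem.List.index? lst1 l).getD 0 : Nat) : Int)), l)))
    (d := (PySem.Dict.empty : PySem.Dict Int (List Int))) (c := c)
  rw [List.foldl_map] at h
  simp only at h
  rw [h, List.filter_map, List.map_map]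
  rw [PySem.Dict.getD_of_not_contains _ ([] : List Int) (PySem.Dict.contains_empty c),
    List.nil_append]
  have hid : ((fun x : Int × Int => x.2) ∘ fun l : Int =>
      (((((PySem.List.index? lst2 l).getD 0 : Nat) : Int)
        + (((PySem.List.index? lst1 l).getD 0 : Nat) : Int)), l)) = fun l => l := rfl
  rw [hid, List.map_id_fun']
  apply List.filter_congr
  intro v _
  rfl

-- min over the distinct keys = min over the raw key list (Int, identity key)
theorem min?_ofList_eq (xs : List Int) :
    PySem.List.min? (PySem.Set.ofList xs) (fun x => x) = PySem.List.min? xs (fun x => x) := by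
  cases hx : PySem.List.min? xs (fun x => x) with
  | none =>
    have hnil := (PySem.List.min?_eq_none_iff xs (fun x => x)).mp hx
    subst hnil
    rfl
  | some a =>
    cases hy : PySem.List.min? (PySem.Set.ofList xs) (fun x => x) with
    | none =>
      have hnil := (PySem.List.min?_eq_none_iff _ (fun x => x)).mp hy
      have hax : a ∈ xs := PySem.List.min?_mem hx
      have : a ∈ PySem.Set.ofList xs := (PySem.Set.mem_ofList _ _).mpr hax
      rw [hnil] at this
      exact absurd this (List.not_mem_nil)
    | some b =>
      have hax : a ∈ xs := PySem.List.min?_mem hx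
      have hbx : b ∈ xs := (PySem.Set.mem_ofList _ _).mp (PySem.List.min?_mem hy)
      have h1 : a ≤ b := PySem.List.min?_isMin hx b hbx
      have h2 : b ≤ a := PySem.List.min?_isMin hy a ((PySem.Set.mem_ofList _ _).mpr hax)
      have : a = b := le_antisymm h1 h2
      rw [this]

-- extracting the min-key group: sorted-items head (A) = lookup at min key
theorem extract_eq (d : PySem.Dict Int (List Int)) (hnd : d.keys.Nodup) (hne : d.keys ≠ []) :
    (match (PySem.List.sorted d.items (fun x => x.1) false).head? with
     | some p => p.2
     | none => ([] : List Int))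
    = (match PySem.List.min? d.keys (fun x => x) with
       | some m => d.getD m []
       | none => ([] : List Int)) := by
  have hitems : d.items ≠ [] := by
    intro h; apply hne; simp [PySem.Dict.keys, h]
  obtain ⟨m, hm⟩ : ∃ m, PySem.List.min? d.keys (fun x => x) = some m := by
    rcases Option.eq_none_or_eq_some (PySem.List.min? d.keys (fun x => x)) with h | h
    · exact absurd ((PySem.List.min?_eq_none_iff d.keys (fun x => x)).mp h) hne
    · exact h
  obtain ⟨p, t, hs⟩ : ∃ p t, PySem.List.sorted d.items (fun x => x.1) false = p :: t := by
    rcases hq : PySem.List.sorted d.items (fun x => x.1) false with _ | ⟨p, t⟩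
    · exact absurd ((PySem.List.sorted_eq_nil_iff d.items (fun x => x.1) false).mp hq) hitems
    · exact ⟨p, t, rfl⟩
  rw [hs, hm]
  simp only [List.head?_cons]
  have hpmem : p ∈ d.items := by
    have := PySem.List.sorted_perm (xs := d.items) (key := fun x : Int × List Int => x.1) (rev := false)
    exact (this.mem_iff).mp (by rw [hs]; exact List.mem_cons_self)
  have hple : ∀ y ∈ d.items, p.1 ≤ y.1 := PySem.List.key_head_sorted_le d.items (fun x => x.1) hs
  have hmin : ∀ y ∈ d.keys, m ≤ y := fun y hy => PySem.List.min?_isMin hm y hy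
  have hmmem : m ∈ d.keys := PySem.List.min?_mem hm
  obtain ⟨q, hq, hq1⟩ : ∃ q ∈ d.items, q.1 = m := by
    simp only [PySem.Dict.keys, List.mem_map] at hmmem
    obtain ⟨q, hq, hq1⟩ := hmmem; exact ⟨q, hq, hq1⟩
  have hpm : p.1 = m := by
    have h1 : p.1 ≤ m := hq1 ▸ hple q hq
    have h2 : m ≤ p.1 := hmin p.1 (by simp [PySem.Dict.keys]; exact ⟨p.2, hpmem⟩)
    omega
  have := PySem.Dict.getD_of_mem_items d (k := p.1) (v := p.2) (by simpa using hpmem) hnd ([] : List Int)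
  rw [← hpm, this]

-- ===== VERDICT (by name: the statement is the Claim_ definition above) =====
theorem CommonElementsIndexSum_spec : Claim_equal_CommonElementsIndexSum := by
  intro lst1 lst2 _ hpre
  unfold Spec_CommonElementsIndexSum CommonElementsIndexSum CommonElementsIndexSum_alt
  simp only
  have hc2 : ∀ v, ((PySem.List.enumerate lst2).foldl
      (fun (d : PySem.Dict Int Int) p => d.setdefault p.2 p.1) PySem.Dict.empty).contains v
      = lst2.contains v := fun v => firstIdx_contains lst2 v
  have hsum : ∀ v, v ∈ lst1 → v ∈ lst2 →
      ((PySem.List.enumerate lst1).foldl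
        (fun (d : PySem.Dict Int Int) p => d.setdefault p.2 p.1) PySem.Dict.empty).getD v 0
      + ((PySem.List.enumerate lst2).foldl
        (fun (d : PySem.Dict Int Int) p => d.setdefault p.2 p.1) PySem.Dict.empty).getD v 0
      = (((PySem.List.index? lst2 v).getD 0 : Nat) : Int)
        + (((PySem.List.index? lst1 v).getD 0 : Nat) : Int) := by
    intro v h1 h2
    rw [firstIdx_getD_of_mem lst1 v h1, firstIdx_getD_of_mem lst2 v h2]
    ring
  have hfilter : lst1.filter (fun v =>
      ((PySem.List.enumerate lst2).foldl
        (fun (d : PySem.Dict Int Int) p => d.setdefault p.2 p.1) PySem.Dict.empty).contains v)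
      = lst1.filter (fun v => lst2.contains v) := by
    apply List.filter_congr
    intro v _
    exact hc2 v
  have hmap : (lst1.filter (fun v =>
      ((PySem.List.enumerate lst2).foldl
        (fun (d : PySem.Dict Int Int) p => d.setdefault p.2 p.1) PySem.Dict.empty).contains v)).map
      (fun v => ((PySem.List.enumerate lst1).foldl
        (fun (d : PySem.Dict Int Int) p => d.setdefault p.2 p.1) PySem.Dict.empty).getD v 0
      + ((PySem.List.enumerate lst2).foldl
        (fun (d : PySem.Dict Int Int) p => d.setdefault p.2 p.1) PySem.Dict.empty).getD v 0)
      = (lst1.filter (fun v => lst2.contains v)).map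
        (fun v => (((PySem.List.index? lst2 v).getD 0 : Nat) : Int)
          + (((PySem.List.index? lst1 v).getD 0 : Nat) : Int)) := by
    rw [hfilter]
    apply List.map_congr_left
    intro v hv
    have h1 : v ∈ lst1 := (List.mem_filter.mp hv).1
    have h2 : v ∈ lst2 := by simpa using (List.mem_filter.mp hv).2
    exact hsum v h1 h2
  rw [Afold_eq_filter lst1 lst2]
  set dA := (lst1.filter (fun l => lst2.contains l)).foldl
      (fun (d : PySem.Dict Int (List Int)) l =>
        d.modify ((((PySem.List.index? lst2 l).getD 0 : Nat) : Int)
          + (((PySem.List.index? lst1 l).getD 0 : Nat) : Int)) [] (· ++ [l]))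
      PySem.Dict.empty with hdA
  have hkeys : dA.keys = PySem.Set.ofList ((lst1.filter (fun l => lst2.contains l)).map
      (fun l => (((PySem.List.index? lst2 l).getD 0 : Nat) : Int)
        + (((PySem.List.index? lst1 l).getD 0 : Nat) : Int))) := by
    rw [hdA, PySem.Dict.keys_foldl_modify_key _ _ ([] : List Int) (fun _ l => (· ++ [l])) _]
    rw [PySem.Dict.keys_empty]
    rfl
  have hFne : lst1.filter (fun l => lst2.contains l) ≠ [] := by
    obtain ⟨x, hx1, hx2⟩ := List.any_eq_true.mp hpre
    exact List.ne_nil_of_mem (List.mem_filter.mpr ⟨hx1, hx2⟩)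
  have hnd : dA.keys.Nodup := by rw [hkeys]; exact PySem.Set.nodup_ofList _
  have hkne : dA.keys ≠ [] := by
    rw [hkeys]
    rcases hF : lst1.filter (fun l => lst2.contains l) with _ | ⟨x, t⟩
    · exact absurd hF hFne
    · exact List.ne_nil_of_mem ((PySem.Set.mem_ofList _ _).mpr
        (List.mem_map_of_mem (List.mem_cons_self)))
  rw [extract_eq dA hnd hkne, hkeys, min?_ofList_eq, hmap]
  cases hmin : PySem.List.min? ((lst1.filter (fun v => lst2.contains v)).map
      (fun v => (((PySem.List.index? lst2 v).getD 0 : Nat) : Int)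
        + (((PySem.List.index? lst1 v).getD 0 : Nat) : Int))) (fun x => x) with
  | none => rfl
  | some m =>
    simp only
    rw [hdA, Adict_getD lst1 lst2 m, List.filter_filter]
    apply List.filter_congr
    intro v hv
    by_cases h2 : v ∈ lst2
    · have hb2 : lst2.contains v = true := by simpa using h2
      have hs := hsum v hv h2
      rw [hc2 v, hb2, hs]
      simp
    · have hb2 : lst2.contains v = false := by simpa using h2
      rw [hc2 v, hb2]
      simp
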